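-- pv_equiv track=rewrite | github.com/youthlx/ToLuLu | practice/answer.py | pair_cover
-- ===== SOURCE A (Python) =====
-- puke_code = {
-- 	'3': 3, '4': 4, '5': 5, '6': 6, '7': 7, '8': 8, '9': 9, '10': 10,
-- 	'J': 11, 'Q': 12, 'K': 13, 'A': 14, '2': 16, 'black_joker': 17, 'color_joker': 18,
-- }
--
-- puke_code_reverse = {
-- 	3: '3', 4: '4', 5: '5', 6: '6', 7: '7', 8: '8', 9: '9', 10: '10',
-- 	11: 'J', 12: 'Q', 13: 'K', 14: 'A', 16: '2', 17: 'black_joker', 18: 'color_joker',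
-- }
--
-- def decode_and_tidy(*args):
-- 	cards = [puke_code[arg] for arg in args]
-- 	cards.sort()
-- 	return cards
--
-- def encode_card(*args):
-- 	return [puke_code_reverse[arg] for arg in args]
--
-- def have_boom_in_mine(card_list):
-- 	cards = decode_and_tidy(*card_list)
-- 	if 17 in cards and 18 in cards:
-- 		return encode_card(17, 18)
-- 	if len(cards) < 4:
-- 		return []
-- 	for i in range(len(cards) - 3):
-- 		if cards[i] == cards[i + 3]:
-- 			return encode_card(cards[i], cards[i], cards[i], cards[i])
-- 	return []
--
-- def pair_cover(enemy_cards, my_cards):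
-- 	boom_card = have_boom_in_mine(my_cards)
-- 	if boom_card:
-- 		return boom_card
-- 	enemy_codes = decode_and_tidy(*enemy_cards)
-- 	my_codes = decode_and_tidy(*my_cards)
-- 	greater_enemy = []
-- 	for my_code in my_codes:
-- 		if my_code > enemy_codes[0] and my_code in greater_enemy:
-- 			return encode_card(my_code, my_code)
-- 		greater_enemy.append(my_code)
-- 	return []
-- ===== SOURCE B (Python) =====
-- puke_code = {
-- 	'3': 3, '4': 4, '5': 5, '6': 6, '7': 7, '8': 8, '9': 9, '10': 10,
-- 	'J': 11, 'Q': 12, 'K': 13, 'A': 14, '2': 16, 'black_joker': 17, 'color_joker': 18,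
-- }
--
-- puke_code_reverse = {
-- 	3: '3', 4: '4', 5: '5', 6: '6', 7: '7', 8: '8', 9: '9', 10: '10',
-- 	11: 'J', 12: 'Q', 13: 'K', 14: 'A', 16: '2', 17: 'black_joker', 18: 'color_joker',
-- }
--
-- def pair_cover(enemy_cards, my_cards):
-- 	counts = {}
-- 	for card in my_cards:
-- 		code = puke_code[card]
-- 		counts[code] = counts.get(code, 0) + 1
-- 	if counts.get(17, 0) >= 1 and counts.get(18, 0) >= 1:
-- 		return ['black_joker', 'color_joker']
-- 	for code in sorted(counts):
-- 		if counts[code] >= 4: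
-- 			return [puke_code_reverse[code]] * 4
-- 	threshold = min(puke_code[card] for card in enemy_cards)
-- 	for code in sorted(counts):
-- 		if counts[code] >= 2 and code > threshold:
-- 			return [puke_code_reverse[code]] * 2
-- 	return []
-- ===== Notes on version B (the rewrite author's own statement) =====
-- stated objective: alternative
-- what changed: The pair search no longer replays A's growing greater_enemy list with a linear membership scan per card: B builds a count dictionary of the hand in one pass and scans the sorted distinct values for the first value with count>=2 above min(enemy); the bomb check is kept unchanged.
-- outside the precondition, e.g. on pair_cover([], []): A returns [], B raises ValueError
import Mathlib
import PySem

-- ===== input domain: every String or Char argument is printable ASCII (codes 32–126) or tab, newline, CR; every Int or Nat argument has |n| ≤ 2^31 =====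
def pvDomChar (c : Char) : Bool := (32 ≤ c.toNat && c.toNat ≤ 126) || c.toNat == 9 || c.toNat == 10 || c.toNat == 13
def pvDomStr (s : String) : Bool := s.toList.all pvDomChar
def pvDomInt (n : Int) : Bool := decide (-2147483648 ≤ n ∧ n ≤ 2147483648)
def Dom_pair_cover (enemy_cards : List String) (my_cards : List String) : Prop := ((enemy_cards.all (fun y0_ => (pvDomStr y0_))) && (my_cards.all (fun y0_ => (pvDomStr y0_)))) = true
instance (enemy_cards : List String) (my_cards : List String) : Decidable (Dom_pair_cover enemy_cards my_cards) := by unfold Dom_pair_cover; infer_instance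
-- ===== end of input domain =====

-- B replaces A's quadratic grown-list membership scan in the pair search by a count
-- dictionary plus a scan of the sorted distinct values; the bomb check is unchanged.


-- ===== PORT A =====
def puke_code : PySem.Dict String Int := PySem.Dict.ofList
  [("3", 3), ("4", 4), ("5", 5), ("6", 6), ("7", 7), ("8", 8), ("9", 9), ("10", 10),
   ("J", 11), ("Q", 12), ("K", 13), ("A", 14), ("2", 16), ("black_joker", 17), ("color_joker", 18)]

def puke_code_reverse : PySem.Dict Int String := PySem.Dict.ofList
  [(3, "3"), (4, "4"), (5, "5"), (6, "6"), (7, "7"), (8, "8"), (9, "9"), (10, "10"),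
   (11, "J"), (12, "Q"), (13, "K"), (14, "A"), (16, "2"), (17, "black_joker"), (18, "color_joker")]

-- card -> code; KeyError (card outside puke_code) is excluded by Pre_, the 0 default is never reached there
def cardCode (s : String) : Int := (puke_code.get? s).getD 0

def decode_and_tidy (args : List String) : List Int :=
  PySem.List.sorted (args.map (fun a => cardCode a)) (fun x => x) false

def encode_card (args : List Int) : List String :=
  args.map (fun a => (puke_code_reverse.get? a).getD "")

-- the 'for i in range(len(cards) - 3)' loop of have_boom_in_mine (indices are in range, so getD is exact)
def boomScan (cards : List Int) : List Nat → List String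
  | [] => []
  | i :: rest =>
    if cards.getD i 0 = cards.getD (i + 3) 0 then
      encode_card [cards.getD i 0, cards.getD i 0, cards.getD i 0, cards.getD i 0]
    else boomScan cards rest

def have_boom_in_mine (card_list : List String) : List String :=
  let cards := decode_and_tidy card_list
  if 17 ∈ cards ∧ 18 ∈ cards then encode_card [17, 18]
  else if cards.length < 4 then []
  else boomScan cards (List.range (cards.length - 3))

-- A's loop over my_codes with the growing greater_enemy list
def pairScanA (e0 : Int) : List Int → List Int → List String
  | [], _ => []
  | c :: rest, seen =>
    if e0 < c ∧ c ∈ seen then encode_card [c, c]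
    else pairScanA e0 rest (seen ++ [c])

def pair_cover (enemy_cards : List String) (my_cards : List String) : List String :=
  match have_boom_in_mine my_cards with
  | [] =>
    let enemy_codes := decode_and_tidy enemy_cards
    let my_codes := decode_and_tidy my_cards
    -- enemy_codes[0] : IndexError on empty enemy_cards is excluded by Pre_ (the loop body reads it only when my_codes ≠ [])
    pairScanA (enemy_codes.getD 0 0) my_codes []
  | boom => boom

-- ===== PORT B =====
-- B's quad scan over the sorted distinct codes, counts looked up in the dictionary
def quadScanB (counts : PySem.Dict Int Int) : List Int → List String
  | [] => []
  | v :: rest =>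
    if 4 ≤ counts.getD v 0 then List.replicate 4 ((puke_code_reverse.get? v).getD "")
    else quadScanB counts rest

-- B's pair scan over the sorted distinct codes
def pairScanB (counts : PySem.Dict Int Int) (e0 : Int) : List Int → List String
  | [] => []
  | v :: rest =>
    if 2 ≤ counts.getD v 0 ∧ e0 < v then List.replicate 2 ((puke_code_reverse.get? v).getD "")
    else pairScanB counts e0 rest

def pair_cover_alt (enemy_cards : List String) (my_cards : List String) : List String :=
  let counts := my_cards.foldl (fun d card => d.insert (cardCode card) (d.getD (cardCode card) 0 + 1)) PySem.Dict.empty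
  if 1 ≤ counts.getD 17 0 ∧ 1 ≤ counts.getD 18 0 then ["black_joker", "color_joker"]
  else
    let boom := quadScanB counts (PySem.List.sorted counts.keys (fun x => x) false)
    if boom ≠ [] then boom
    else
      -- min(...) : ValueError on empty enemy_cards is excluded by Pre_
      let threshold := (PySem.List.min? (enemy_cards.map (fun c => cardCode c)) (fun x => x)).getD 0
      pairScanB counts threshold (PySem.List.sorted counts.keys (fun x => x) false)

-- ===== PRECONDITION & SPEC =====
-- a bomb as A's hand condition: both jokers, or some code four times
def BoomHand (my_cards : List String) : Prop :=
  (17 : Int) ∈ my_cards.map cardCode ∧ (18 : Int) ∈ my_cards.map cardCode ∨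
    ∃ v ∈ my_cards.map cardCode, 4 ≤ (my_cards.map cardCode).count v

-- Pre_ excludes cards outside puke_code (KeyError in both programs) and empty enemy_cards without a
-- bomb in hand: there A raises IndexError whenever my_cards is nonempty, and on my_cards = [] A's []
-- is an accident of enemy_codes[0] being read only inside the loop — B's min(enemy) raises ValueError.
def Pre_pair_cover (enemy_cards : List String) (my_cards : List String) : Prop :=
  (∀ c ∈ enemy_cards, (puke_code.get? c).isSome) ∧
  (∀ c ∈ my_cards, (puke_code.get? c).isSome) ∧
  (enemy_cards ≠ [] ∨ BoomHand my_cards)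
instance (enemy_cards : List String) (my_cards : List String) : Decidable (Pre_pair_cover enemy_cards my_cards) := by unfold Pre_pair_cover BoomHand; infer_instance

def pvWitness_pair_cover : List String × List String := (["3"], ["A", "A", "4"])

def Spec_pair_cover (enemy_cards : List String) (my_cards : List String) (out : List String) : Prop := out = pair_cover_alt enemy_cards my_cards
instance (enemy_cards : List String) (my_cards : List String) (out : List String) : Decidable (Spec_pair_cover enemy_cards my_cards out) := by unfold Spec_pair_cover; infer_instance

-- ===== CLAIM (what is proved, stated in full; the proofs are below) =====
def Claim_equal_pair_cover : Prop := ∀ (enemy_cards : List String) (my_cards : List String), Dom_pair_cover enemy_cards my_cards → Pre_pair_cover enemy_cards my_cards → Spec_pair_cover enemy_cards my_cards (pair_cover enemy_cards my_cards)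

-- ===== LEMMAS AND PROOFS =====

lemma encode_pair (v : Int) : encode_card [v, v] = List.replicate 2 ((puke_code_reverse.get? v).getD "") := by
  simp [encode_card, List.replicate]

lemma encode_quad (v : Int) :
    encode_card [v, v, v, v] = List.replicate 4 ((puke_code_reverse.get? v).getD "") := by
  simp [encode_card, List.replicate]

lemma getD_run (a : Int) (m i : ℕ) (t : List Int) (h : i < m) :
    (List.replicate m a ++ t).getD i 0 = a := by
  rw [List.getD_append _ _ _ _ (by simpa using h),
    List.getD_eq_getElem _ _ (by simpa using h)]
  exact List.getElem_replicate _

-- A's quad scan with the counts abstracted (proof-side helper)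
def scanQuad (cnt : Int → Nat) : List Int → List String
  | [] => []
  | v :: rest =>
    if 4 ≤ (cnt v : Int) then List.replicate 4 ((puke_code_reverse.get? v).getD "")
    else scanQuad cnt rest

lemma quadScanB_eq_scanQuad (counts : PySem.Dict Int Int) (cnt : Int → Nat) :
    ∀ L : List Int, (∀ v ∈ L, counts.getD v 0 = (cnt v : Int)) →
    quadScanB counts L = scanQuad cnt L := by
  intro L
  induction L with
  | nil => intro _; rfl
  | cons v rest ih =>
    intro h
    simp only [quadScanB, scanQuad, h v (by simp)]
    rw [ih (fun w hw => h w (by simp [hw]))]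

lemma scanQuad_congr (c1 c2 : Int → Nat) :
    ∀ L : List Int, (∀ v ∈ L, c1 v = c2 v) → scanQuad c1 L = scanQuad c2 L := by
  intro L
  induction L with
  | nil => intro _; rfl
  | cons v rest ih =>
    intro h
    simp only [scanQuad, h v (by simp)]
    rw [ih (fun w hw => h w (by simp [hw]))]

lemma boomScan_no_fire (cards : List Int) :
    ∀ l1 l2 : List ℕ, (∀ i ∈ l1, cards.getD i 0 ≠ cards.getD (i + 3) 0) →
    boomScan cards (l1 ++ l2) = boomScan cards l2 := by
  intro l1
  induction l1 with
  | nil => intro l2 _; rfl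
  | cons i rest ih =>
    intro l2 h
    simp only [List.cons_append, boomScan, if_neg (h i (by simp))]
    exact ih l2 (fun j hj => h j (by simp [hj]))

lemma boomScan_shift (a : Int) (m : ℕ) (t : List Int) :
    ∀ l : List ℕ, boomScan (List.replicate m a ++ t) (l.map (m + ·)) = boomScan t l := by
  have g : ∀ j : ℕ, (List.replicate m a ++ t).getD (m + j) 0 = t.getD j 0 := by
    intro j
    rw [List.getD_append_right _ _ _ _ (by simp)]
    simp
  intro l
  induction l with
  | nil => rfl
  | cons i rest ih =>
    simp only [List.map_cons, boomScan]
    rw [g i, show m + i + 3 = m + (i + 3) by omega, g (i + 3)]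
    split_ifs with h
    · rfl
    · exact ih


-- B's scan with the dictionary replaced by an abstract count function (proof-side helper)
def scanCnt (e0 : Int) (cnt : Int → Nat) : List Int → List String
  | [] => []
  | v :: rest =>
    if 2 ≤ (cnt v : Int) ∧ e0 < v then List.replicate 2 ((puke_code_reverse.get? v).getD "")
    else scanCnt e0 cnt rest

lemma scanB_eq_scanCnt (counts : PySem.Dict Int Int) (e0 : Int) (cnt : Int → Nat) :
    ∀ L : List Int, (∀ v ∈ L, counts.getD v 0 = (cnt v : Int)) →
    pairScanB counts e0 L = scanCnt e0 cnt L := by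
  intro L
  induction L with
  | nil => intro _; rfl
  | cons v rest ih =>
    intro h
    simp only [pairScanB, scanCnt, h v (by simp)]
    rw [ih (fun w hw => h w (by simp [hw]))]

lemma scanCnt_congr (e0 : Int) (c1 c2 : Int → Nat) :
    ∀ L : List Int, (∀ v ∈ L, c1 v = c2 v) → scanCnt e0 c1 L = scanCnt e0 c2 L := by
  intro L
  induction L with
  | nil => intro _; rfl
  | cons v rest ih =>
    intro h
    simp only [scanCnt, h v (by simp)]
    rw [ih (fun w hw => h w (by simp [hw]))]

lemma scanA_seen_congr (e0 : Int) :
    ∀ (s seen1 seen2 : List Int), (∀ c ∈ s, (c ∈ seen1 ↔ c ∈ seen2)) →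
    pairScanA e0 s seen1 = pairScanA e0 s seen2 := by
  intro s
  induction s with
  | nil => intro _ _ _; rfl
  | cons c rest ih =>
    intro s1 s2 h
    have hc := h c (by simp)
    by_cases hcond : e0 < c ∧ c ∈ s1
    · have : e0 < c ∧ c ∈ s2 := ⟨hcond.1, hc.mp hcond.2⟩
      simp only [pairScanA, if_pos hcond, if_pos this]
    · have : ¬ (e0 < c ∧ c ∈ s2) := by
        intro hh; exact hcond ⟨hh.1, hc.mpr hh.2⟩
      simp only [pairScanA, if_neg hcond, if_neg this]
      exact ih _ _ (fun w hw => by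
        simp only [List.mem_append, List.mem_singleton]
        exact or_congr (h w (by simp [hw])) Iff.rfl)

-- scanning a run of a with a ≤ e0 never fires
lemma scanA_run_le (e0 a : Int) (ha : a ≤ e0) :
    ∀ (m : ℕ) (t seen : List Int),
    pairScanA e0 (List.replicate m a ++ t) seen = pairScanA e0 t (seen ++ List.replicate m a) := by
  intro m
  induction m with
  | zero => intro t seen; simp
  | succ m ih =>
    intro t seen
    have hne : ¬ (e0 < a ∧ a ∈ seen) := by
      intro h; exact absurd h.1 (not_lt.mpr ha)
    simp only [List.replicate_succ, List.cons_append, pairScanA, if_neg hne]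
    rw [ih t (seen ++ [a])]
    congr 1
    simp

-- run decomposition of a sorted list
lemma run_decomp (a : Int) (s0 : List Int) (h : (a :: s0).Pairwise (· ≤ ·)) :
    ∃ m t, a :: s0 = List.replicate m a ++ t ∧ (a :: s0).count a = m ∧ 1 ≤ m ∧ ∀ x ∈ t, a < x := by
  induction s0 with
  | nil =>
    exact ⟨1, [], by simp, by simp, le_refl _, by simp⟩
  | cons b s1 ih =>
    by_cases hb : b = a
    · subst hb
      have h' : (b :: s1).Pairwise (· ≤ ·) := h.tail
      obtain ⟨m, t, he, hc, hm, ht⟩ := ih h'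
      refine ⟨m + 1, t, ?_, ?_, by omega, ht⟩
      · simp only [List.replicate_succ, List.cons_append]
        rw [← he]
      · rw [List.count_cons_self, hc]
    · have hab : a ≤ b := (List.pairwise_cons.mp h).1 b (by simp)
      have halt : ∀ x ∈ b :: s1, a < x := by
        intro x hx
        have hbx : b ≤ x := by
          rcases List.mem_cons.mp hx with rfl | hx'
          · exact le_refl _
          · exact (List.pairwise_cons.mp h.tail).1 x hx'
        have : a ≠ b := fun hh => hb hh.symm
        exact lt_of_lt_of_le (lt_of_le_of_ne hab this) hbx
      refine ⟨1, b :: s1, by simp, ?_, le_refl _, halt⟩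
      have : (b :: s1).count a = 0 := by
        rw [List.count_eq_zero]
        intro hmem
        exact absurd rfl (ne_of_gt (halt a hmem)).symm
      rw [List.count_cons_self, this]

-- the central lemma: A's scan on the sorted list = the count scan over any strictly
-- increasing enumeration of its values
lemma scanA_eq_scanCnt (e0 : Int) :
    ∀ (n : ℕ) (s L : List Int), s.length ≤ n → s.Pairwise (· ≤ ·) → L.Pairwise (· < ·) →
    (∀ v, v ∈ L ↔ v ∈ s) →
    pairScanA e0 s [] = scanCnt e0 (fun v => s.count v) L := by
  intro n
  induction n with
  | zero =>
    intro s L hlen _ _ hmem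
    have hs : s = [] := List.eq_nil_of_length_eq_zero (Nat.le_zero.mp hlen)
    subst hs
    cases L with
    | nil => rfl
    | cons v rest => exact absurd ((hmem v).mp (by simp)) (by simp)
  | succ n ih =>
    intro s L hlen hsort hLsort hmem
    cases hs : s with
    | nil =>
      subst hs
      cases L with
      | nil => rfl
      | cons v rest => exact absurd ((hmem v).mp (by simp)) (by simp)
    | cons a s0 =>
      subst hs
      obtain ⟨m, t, he, hcnt, hm, ht⟩ := run_decomp a s0 hsort
      -- L = a :: L' with L' enumerating t
      obtain ⟨L', hL⟩ : ∃ L', L = a :: L' := by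
        cases hLcase : L with
        | nil => exact absurd ((hmem a).mpr (by simp)) (by rw [hLcase]; simp)
        | cons b L' =>
          refine ⟨L', ?_⟩
          have hbs : b ∈ a :: s0 := (hmem b).mp (by rw [hLcase]; simp)
          have hba : a ≤ b := by
            rcases List.mem_cons.mp hbs with rfl | hb'
            · exact le_refl _
            · exact (List.pairwise_cons.mp hsort).1 b hb'
          have haL : a ∈ b :: L' := by rw [← hLcase]; exact (hmem a).mpr (by simp)
          rcases List.mem_cons.mp haL with rfl | ha'
          · rfl
          · have : b < a := by
              rw [hLcase] at hLsort
              exact (List.pairwise_cons.mp hLsort).1 a ha'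
            omega
      subst hL
      have haL' : a ∉ L' := by
        intro hmem'
        exact absurd ((List.pairwise_cons.mp hLsort).1 a hmem') (lt_irrefl a)
      have hmemL' : ∀ v, v ∈ L' ↔ v ∈ t := by
        intro v
        constructor
        · intro hv
          have hvs : v ∈ a :: s0 := (hmem v).mp (by simp [hv])
          have hav : a < v := (List.pairwise_cons.mp hLsort).1 v hv
          rw [he] at hvs
          rcases List.mem_append.mp hvs with hrep | hin
          · exact absurd (List.eq_of_mem_replicate hrep) (ne_of_gt hav)
          · exact hin
        · intro hv
          have : v ∈ a :: L' := (hmem v).mpr (by rw [he]; simp [hv])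
          rcases List.mem_cons.mp this with rfl | h'
          · exact absurd (ht v hv) (lt_irrefl v)
          · exact h'
      have hanot : a ∉ t := fun hh => absurd (ht a hh) (lt_irrefl a)
      have hcount_a : (a :: s0).count a = m := hcnt
      have htlen : t.length ≤ n := by
        have : (a :: s0).length = m + t.length := by rw [he]; simp
        simp only [List.length_cons] at this hlen
        omega
      have htsort : t.Pairwise (· ≤ ·) := by
        have := he ▸ hsort
        exact (List.pairwise_append.mp this).2.1
      have hL'sort : L'.Pairwise (· < ·) := hLsort.tail
      have hcount_t : ∀ v ∈ L', (a :: s0).count v = t.count v := by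
        intro v hv
        have hvt : v ∈ t := (hmemL' v).mp hv
        have hva : v ≠ a := ne_of_gt (ht v hvt)
        rw [he, List.count_append, List.count_replicate]
        simp [Ne.symm hva]
      by_cases hfire : 2 ≤ m ∧ e0 < a
      · -- both return the pair of a
        obtain ⟨m', hm'⟩ : ∃ m', m = m' + 2 := ⟨m - 2, by omega⟩
        have he2 : a :: s0 = a :: a :: (List.replicate m' a ++ t) := by
          rw [he, hm']
          simp [List.replicate_succ]
        have hca : (a :: a :: (List.replicate m' a ++ t)).count a = m := by
          rw [← he2]; exact hcount_a
        rw [he2]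
        simp only [pairScanA, scanCnt]
        rw [if_neg (by simp),
          if_pos (show e0 < a ∧ a ∈ ([] : List Int) ++ [a] from ⟨hfire.2, by simp⟩),
          if_pos (show 2 ≤ (((a :: a :: (List.replicate m' a ++ t)).count a : Nat) : Int) ∧ e0 < a from
            ⟨by rw [hca]; exact_mod_cast hfire.1, hfire.2⟩)]
        exact encode_pair a
      · -- the run does not fire on either side
        have hcnt_head : ¬ (2 ≤ ((a :: s0).count a : Int) ∧ e0 < a) := by
          rw [hcount_a]
          intro hh
          exact hfire ⟨by exact_mod_cast hh.1, hh.2⟩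
        have hstep : pairScanA e0 (a :: s0) [] = pairScanA e0 t [] := by
          rw [he]
          rcases Nat.lt_or_ge m 2 with hm2 | hm2
          · -- m = 1
            have hm1 : m = 1 := by omega
            subst hm1
            simp only [List.replicate_one, List.cons_append, pairScanA,
              List.mem_nil_iff, and_false, List.nil_append]
            rw [if_neg (by simp)]
            exact scanA_seen_congr e0 t [a] [] (fun c hc => by
              simp [ne_of_gt (ht c hc)])
          · -- a ≤ e0 (else fire), walk through the run
            have hae : a ≤ e0 := by
              by_contra hh
              exact hfire ⟨hm2, by omega⟩
            rw [scanA_run_le e0 a hae m t []]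
            exact scanA_seen_congr e0 t (List.replicate m a) [] (fun c hc => by
              simp only [List.mem_replicate, List.mem_nil_iff, iff_false]
              intro hh
              exact absurd hh.2 (ne_of_gt (ht c hc)))
        rw [hstep]
        simp only [scanCnt, if_neg hcnt_head]
        rw [scanCnt_congr e0 _ (fun v => t.count v) L' (fun v hv => hcount_t v hv)]
        exact ih t L' htlen htsort hL'sort hmemL'
  
-- A's bomb quad search on the sorted list = the count scan over any strictly
-- increasing enumeration of its values
lemma boomA_eq_scanQuad :
    ∀ (n : ℕ) (s L : List Int), s.length ≤ n → s.Pairwise (· ≤ ·) → L.Pairwise (· < ·) →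
    (∀ v, v ∈ L ↔ v ∈ s) →
    (if s.length < 4 then [] else boomScan s (List.range (s.length - 3))) =
      scanQuad (fun v => s.count v) L := by
  intro n
  induction n with
  | zero =>
    intro s L hlen _ _ hmem
    have hs : s = [] := List.eq_nil_of_length_eq_zero (Nat.le_zero.mp hlen)
    subst hs
    cases L with
    | nil => rfl
    | cons v rest => exact absurd ((hmem v).mp (by simp)) (by simp)
  | succ n ih =>
    intro s L hlen hsort hLsort hmem
    cases hs : s with
    | nil =>
      subst hs
      cases L with
      | nil => rfl
      | cons v rest => exact absurd ((hmem v).mp (by simp)) (by simp)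
    | cons a s0 =>
      subst hs
      obtain ⟨m, t, he, hcnt, hm, ht⟩ := run_decomp a s0 hsort
      obtain ⟨L', hL⟩ : ∃ L', L = a :: L' := by
        cases hLcase : L with
        | nil => exact absurd ((hmem a).mpr (by simp)) (by rw [hLcase]; simp)
        | cons b L' =>
          refine ⟨L', ?_⟩
          have hbs : b ∈ a :: s0 := (hmem b).mp (by rw [hLcase]; simp)
          have hba : a ≤ b := by
            rcases List.mem_cons.mp hbs with rfl | hb'
            · exact le_refl _
            · exact (List.pairwise_cons.mp hsort).1 b hb'
          have haL : a ∈ b :: L' := by rw [← hLcase]; exact (hmem a).mpr (by simp)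
          rcases List.mem_cons.mp haL with rfl | ha'
          · rfl
          · have : b < a := by
              rw [hLcase] at hLsort
              exact (List.pairwise_cons.mp hLsort).1 a ha'
            omega
      subst hL
      have hmemL' : ∀ v, v ∈ L' ↔ v ∈ t := by
        intro v
        constructor
        · intro hv
          have hvs : v ∈ a :: s0 := (hmem v).mp (by simp [hv])
          have hav : a < v := (List.pairwise_cons.mp hLsort).1 v hv
          rw [he] at hvs
          rcases List.mem_append.mp hvs with hrep | hin
          · exact absurd (List.eq_of_mem_replicate hrep) (ne_of_gt hav)
          · exact hin
        · intro hv
          have : v ∈ a :: L' := (hmem v).mpr (by rw [he]; simp [hv])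
          rcases List.mem_cons.mp this with rfl | h'
          · exact absurd (ht v hv) (lt_irrefl v)
          · exact h'
      have hlen_eq : (a :: s0).length = m + t.length := by rw [he]; simp
      have htlen : t.length ≤ n := by
        simp only [List.length_cons] at hlen_eq hlen
        omega
      have htsort : t.Pairwise (· ≤ ·) := (List.pairwise_append.mp (he ▸ hsort)).2.1
      have hL'sort : L'.Pairwise (· < ·) := hLsort.tail
      have hcount_t : ∀ v ∈ L', (a :: s0).count v = t.count v := by
        intro v hv
        have hvt : v ∈ t := (hmemL' v).mp hv
        have hz : (List.replicate m a).count v = 0 :=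
          List.count_eq_zero.mpr (fun hmem' =>
            absurd (List.eq_of_mem_replicate hmem') (ne_of_gt (ht v hvt)))
        rw [he, List.count_append, hz, Nat.zero_add]
      have ihres := ih t L' htlen htsort hL'sort hmemL'
      by_cases hm4 : 4 ≤ m
      · -- the quad fires at the head of the run on both sides
        have hfire : (4 : Int) ≤ (((a :: s0).count a : Nat) : Int) := by
          rw [hcnt]; exact_mod_cast hm4
        rw [if_neg (by simp only [List.length_cons] at hlen_eq ⊢; omega)]
        obtain ⟨k, hk⟩ : ∃ k, (a :: s0).length - 3 = k + 1 := by
          refine ⟨(a :: s0).length - 4, ?_⟩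
          simp only [List.length_cons] at hlen_eq ⊢
          omega
        rw [hk, List.range_succ_eq_map, he]
        simp only [boomScan, Nat.zero_add]
        rw [getD_run a m 0 t (by omega), getD_run a m 3 t (by omega), if_pos rfl]
        simp only [scanQuad]
        rw [if_pos (by rw [← he]; exact hfire), encode_quad]
      · -- m ≤ 3: the run cannot fire; step to t on both sides
        have hnofire : ∀ i, i < m → i + 3 < (a :: s0).length →
            (List.replicate m a ++ t).getD i 0 ≠ (List.replicate m a ++ t).getD (i + 3) 0 := by
          intro i hi hi3
          rw [getD_run a m i t hi]
          have h3m : m ≤ i + 3 := by omega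
          rw [List.getD_append_right _ _ _ _ (by simpa using h3m)]
          have hidx : i + 3 - (List.replicate m a).length < t.length := by
            simp only [List.length_replicate]
            simp only [List.length_cons] at hlen_eq hi3
            omega
          rw [List.getD_eq_getElem _ _ hidx]
          exact ne_of_lt (ht _ (List.getElem_mem hidx))
        have hrhs : scanQuad (fun v => (a :: s0).count v) (a :: L') =
            scanQuad (fun v => t.count v) L' := by
          simp only [scanQuad]
          rw [if_neg (by rw [hcnt]; intro hh; exact hm4 (by exact_mod_cast hh))]
          exact scanQuad_congr _ _ L' hcount_t
        rw [hrhs, ← ihres]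
        by_cases hlen4 : (a :: s0).length < 4
        · rw [if_pos hlen4, if_pos (by simp only [List.length_cons] at hlen_eq hlen4 ⊢; omega)]
        · rw [if_neg hlen4]
          by_cases ht3 : 3 ≤ t.length
          · have hsplit : (a :: s0).length - 3 = m + (t.length - 3) := by
              simp only [List.length_cons] at hlen_eq ⊢
              omega
            rw [hsplit, List.range_add, he, boomScan_no_fire _ _ _ (fun i hi => by
              have him : i < m := List.mem_range.mp hi
              refine hnofire i him ?_
              simp only [List.length_cons] at hlen_eq ⊢
              omega), boomScan_shift]
            by_cases ht4 : t.length < 4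
            · rw [if_pos ht4, show t.length - 3 = 0 by omega]
              rfl
            · rw [if_neg ht4]
          · -- t too short: nothing fires anywhere
            rw [he]
            rw [show List.range ((List.replicate m a ++ t).length - 3)
                = List.range ((List.replicate m a ++ t).length - 3) ++ [] by simp]
            rw [boomScan_no_fire _ _ _ (fun i hi => by
              have him := List.mem_range.mp hi
              simp only [List.length_append, List.length_replicate] at him
              refine hnofire i (by omega) ?_
              simp only [List.length_cons] at hlen_eq ⊢
              omega)]
            rw [if_pos (by omega)]
            rfl

-- a sorted list with a quadruple has equal entries three apart
lemma sorted_quad (v : Int) :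
    ∀ (n : ℕ) (s : List Int), s.length ≤ n → s.Pairwise (· ≤ ·) → 4 ≤ s.count v →
    ∃ i, i + 3 < s.length ∧ s.getD i 0 = s.getD (i + 3) 0 := by
  intro n
  induction n with
  | zero =>
    intro s hlen _ hc
    have : s = [] := List.eq_nil_of_length_eq_zero (Nat.le_zero.mp hlen)
    subst this; simp at hc
  | succ n ih =>
    intro s hlen hsort hc
    cases hs : s with
    | nil => subst hs; simp at hc
    | cons a s0 =>
      subst hs
      obtain ⟨m, t, he, hcnt, hm, ht⟩ := run_decomp a s0 hsort
      by_cases hva : v = a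
      · subst hva
        have hm4 : 4 ≤ m := by rw [← hcnt]; exact hc
        have hlen' : (v :: s0).length = m + t.length := by rw [he]; simp
        have hget : ∀ i, i < m → (List.replicate m v ++ t).getD i 0 = v := by
          intro i hi
          rw [List.getD_append _ _ _ _ (by simpa using hi),
            List.getD_eq_getElem _ _ (by simpa using hi)]
          exact List.getElem_replicate _
        refine ⟨0, by omega, ?_⟩
        rw [he]
        rw [hget 0 (by omega), hget 3 (by omega)]
      · have hz : (List.replicate m a).count v = 0 :=
          List.count_eq_zero.mpr (fun hmem => hva (List.eq_of_mem_replicate hmem))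
        have hct : 4 ≤ t.count v := by
          rw [he, List.count_append, hz] at hc
          omega
        have htlen : t.length ≤ n := by
          have hlen' : (a :: s0).length = m + t.length := by rw [he]; simp
          simp only [List.length_cons] at hlen' hlen
          omega
        have htsort : t.Pairwise (· ≤ ·) := (List.pairwise_append.mp (he ▸ hsort)).2.1
        obtain ⟨i, hi, heq⟩ := ih t htlen htsort hct
        refine ⟨m + i, ?_, ?_⟩
        · rw [he]; simp; omega
        · rw [he]
          have g1 : (List.replicate m a ++ t).getD (m + i) 0 = t.getD i 0 := by
            rw [List.getD_append_right _ _ _ _ (by simp)]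
            simp
          have g2 : (List.replicate m a ++ t).getD (m + i + 3) 0 = t.getD (i + 3) 0 := by
            rw [List.getD_append_right _ _ _ _ (by simp; omega)]
            congr 1
            simp; omega
          rw [g1, g2]; exact heq

lemma boomScan_ne_nil (cards : List Int) :
    ∀ l : List ℕ, (∃ i ∈ l, cards.getD i 0 = cards.getD (i + 3) 0) → boomScan cards l ≠ [] := by
  intro l
  induction l with
  | nil => intro h; simp at h
  | cons i rest ih =>
    intro ⟨j, hj, heq⟩
    simp only [boomScan]
    by_cases hi : cards.getD i 0 = cards.getD (i + 3) 0
    · rw [if_pos hi]; simp [encode_card]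
    · rw [if_neg hi]
      rcases List.mem_cons.mp hj with rfl | hj'
      · exact absurd heq hi
      · exact ih ⟨j, hj', heq⟩

-- a BoomHand really makes have_boom_in_mine return a non-empty list
lemma boom_of_boomHand (my_cards : List String) (h : BoomHand my_cards) :
    have_boom_in_mine my_cards ≠ [] := by
  unfold have_boom_in_mine decode_and_tidy
  set codes := my_cards.map (fun a => cardCode a) with hcodes
  set mc := PySem.List.sorted codes (fun x => x) false with hmc
  have hperm : mc.Perm codes := PySem.List.sorted_perm codes (fun x => x) false
  by_cases hj : (17 : Int) ∈ mc ∧ (18 : Int) ∈ mc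
  · rw [if_pos hj]; simp [encode_card]
  · rw [if_neg hj]
    rcases h with ⟨h17, h18⟩ | ⟨v, hv, hc⟩
    · exact absurd ⟨hperm.mem_iff.mpr h17, hperm.mem_iff.mpr h18⟩ hj
    · have hcmc : 4 ≤ mc.count v := by rw [hperm.count_eq]; exact hc
      have hlen : 4 ≤ mc.length := le_trans hcmc (List.count_le_length)
      rw [if_neg (by omega)]
      obtain ⟨i, hi, heq⟩ := sorted_quad v mc.length mc (le_refl _)
        (PySem.List.sorted_pairwise codes (fun x => x)) hcmc
      exact boomScan_ne_nil mc (List.range (mc.length - 3))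
        ⟨i, List.mem_range.mpr (by omega), heq⟩

-- head of the sorted enemy codes = min(enemy codes), enemy nonempty
lemma head_sorted_eq_min (l : List Int) (hne : l ≠ []) :
    (PySem.List.sorted l (fun x => x) false).getD 0 0 = (PySem.List.min? l (fun x => x)).getD 0 := by
  cases l with
  | nil => exact absurd rfl hne
  | cons x ls =>
    have hm : PySem.List.min? (x :: ls) (fun y => y) = some (ls.foldl min x) :=
      PySem.List.min?_id_cons x ls
    obtain ⟨h0, tl, hsl⟩ : ∃ h0 tl, PySem.List.sorted (x :: ls) (fun x => x) false = h0 :: tl := by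
      cases h : PySem.List.sorted (x :: ls) (fun x => x) false with
      | nil => exact absurd ((PySem.List.sorted_eq_nil_iff _ _ _).mp h) (by simp)
      | cons h0 tl => exact ⟨h0, tl, rfl⟩
    rw [hsl, hm]
    simp only [List.getD_cons_zero, Option.getD_some]
    have hmem : h0 ∈ x :: ls := (PySem.List.mem_sorted _ _ _ h0).mp (by rw [hsl]; simp)
    have hmin_mem : ls.foldl min x ∈ x :: ls := PySem.List.min?_mem hm
    have h1 : ls.foldl min x ≤ h0 := PySem.List.min?_isMin hm h0 hmem
    have h2 : h0 ≤ ls.foldl min x := PySem.List.key_head_sorted_le _ _ hsl _ hmin_mem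
    omega

-- pair_cover_alt with the counting loop named as Counter(codes)
lemma alt_unfold (enemy_cards my_cards : List String) :
    pair_cover_alt enemy_cards my_cards =
      (let counts := PySem.Dict.counter (my_cards.map (fun a => cardCode a))
       if 1 ≤ counts.getD 17 0 ∧ 1 ≤ counts.getD 18 0 then ["black_joker", "color_joker"]
       else
         let boom := quadScanB counts (PySem.List.sorted counts.keys (fun x => x) false)
         if boom ≠ [] then boom
         else
           pairScanB counts ((PySem.List.min? (enemy_cards.map (fun c => cardCode c)) (fun x => x)).getD 0)
             (PySem.List.sorted counts.keys (fun x => x) false)) := by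
  unfold pair_cover_alt
  rw [show my_cards.foldl (fun d card => d.insert (cardCode card) (d.getD (cardCode card) 0 + 1)) PySem.Dict.empty
      = PySem.Dict.counter (my_cards.map (fun a => cardCode a)) from by
    rw [← PySem.Dict.foldl_insert_getD_add_one_eq_counter, List.foldl_map]]

-- ===== VERDICT (by name: the statement is the Claim_ definition above) =====
theorem pair_cover_spec : Claim_equal_pair_cover := by
  intro enemy_cards my_cards _ hpre
  obtain ⟨hEvalid, hMvalid, hthird⟩ := hpre
  show pair_cover enemy_cards my_cards = pair_cover_alt enemy_cards my_cards
  set codes := my_cards.map (fun a => cardCode a) with hcodes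
  set mc := PySem.List.sorted codes (fun x => x) false with hmc
  have hperm : mc.Perm codes := PySem.List.sorted_perm codes (fun x => x) false
  set L := PySem.List.sorted (PySem.Dict.counter codes).keys (fun x => x) false with hL
  have hkeys : (PySem.Dict.counter codes).keys = PySem.Set.ofList codes := PySem.Dict.keys_counter codes
  have hLsort : L.Pairwise (· < ·) := by
    rw [hL, hkeys]
    exact PySem.List.sorted_ofList_pairwise_lt codes
  have hLmem : ∀ v, v ∈ L ↔ v ∈ mc := by
    intro v
    rw [hL, PySem.List.mem_sorted, hkeys, PySem.Set.mem_ofList, hperm.mem_iff]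
  have hgetD : ∀ v, (PySem.Dict.counter codes).getD v 0 = ((mc.count v : Nat) : Int) := by
    intro v
    rw [PySem.Dict.getD_counter, hperm.count_eq]
  have hjok : (17 ∈ mc ∧ 18 ∈ mc) ↔
      (1 ≤ (PySem.Dict.counter codes).getD 17 0 ∧ 1 ≤ (PySem.Dict.counter codes).getD 18 0) := by
    rw [hgetD 17, hgetD 18]
    constructor
    · rintro ⟨h17, h18⟩
      have c17 : 0 < mc.count 17 := List.count_pos_iff.mpr h17
      have c18 : 0 < mc.count 18 := List.count_pos_iff.mpr h18
      exact ⟨by exact_mod_cast c17, by exact_mod_cast c18⟩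
    · rintro ⟨h17, h18⟩
      have c17 : 0 < mc.count 17 := by exact_mod_cast h17
      have c18 : 0 < mc.count 18 := by exact_mod_cast h18
      exact ⟨List.count_pos_iff.mp c17, List.count_pos_iff.mp c18⟩
  have hquad : (if mc.length < 4 then [] else boomScan mc (List.range (mc.length - 3)))
      = quadScanB (PySem.Dict.counter codes) L := by
    rw [quadScanB_eq_scanQuad _ (fun v => mc.count v) L (fun v _ => hgetD v)]
    exact boomA_eq_scanQuad mc.length mc L (le_refl _)
      (PySem.List.sorted_pairwise codes (fun x => x)) hLsort hLmem
  have hboomA : have_boom_in_mine my_cards =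
      (if 17 ∈ mc ∧ 18 ∈ mc then encode_card [17, 18]
       else quadScanB (PySem.Dict.counter codes) L) := by
    unfold have_boom_in_mine decode_and_tidy
    rw [← hcodes, ← hmc]
    show (if 17 ∈ mc ∧ 18 ∈ mc then encode_card [17, 18]
        else if mc.length < 4 then [] else boomScan mc (List.range (mc.length - 3))) =
      (if 17 ∈ mc ∧ 18 ∈ mc then encode_card [17, 18] else quadScanB (PySem.Dict.counter codes) L)
    rw [hquad]
  have hA : pair_cover enemy_cards my_cards =
      (match have_boom_in_mine my_cards with
       | [] => pairScanA ((decode_and_tidy enemy_cards).getD 0 0) (decode_and_tidy my_cards) []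
       | boom => boom) := rfl
  have halt : pair_cover_alt enemy_cards my_cards =
      (if 1 ≤ (PySem.Dict.counter codes).getD 17 0 ∧ 1 ≤ (PySem.Dict.counter codes).getD 18 0
       then ["black_joker", "color_joker"]
       else if quadScanB (PySem.Dict.counter codes) L ≠ [] then quadScanB (PySem.Dict.counter codes) L
       else pairScanB (PySem.Dict.counter codes)
         ((PySem.List.min? (enemy_cards.map (fun c => cardCode c)) (fun x => x)).getD 0) L) :=
    alt_unfold enemy_cards my_cards
  rw [hA, halt, hboomA]
  by_cases hj : 17 ∈ mc ∧ 18 ∈ mc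
  · rw [if_pos hj, if_pos (hjok.mp hj),
      show encode_card [17, 18] = ["black_joker", "color_joker"] from by decide]
  · rw [if_neg hj, if_neg (fun hh => hj (hjok.mpr hh))]
    by_cases hq : quadScanB (PySem.Dict.counter codes) L = []
    · rw [hq]
      show pairScanA ((decode_and_tidy enemy_cards).getD 0 0) (decode_and_tidy my_cards) [] =
        pairScanB (PySem.Dict.counter codes)
          ((PySem.List.min? (enemy_cards.map (fun c => cardCode c)) (fun x => x)).getD 0) L
      have hene : enemy_cards ≠ [] := by
        rcases hthird with h | h
        · exact h
        · refine absurd ?_ (boom_of_boomHand my_cards h)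
          rw [hboomA, if_neg hj, hq]
      have hthr : (decode_and_tidy enemy_cards).getD 0 0 =
          (PySem.List.min? (enemy_cards.map (fun c => cardCode c)) (fun x => x)).getD 0 := by
        unfold decode_and_tidy
        exact head_sorted_eq_min _ (by simp [hene])
      rw [hthr]
      set e0 := (PySem.List.min? (enemy_cards.map (fun c => cardCode c)) (fun x => x)).getD 0
      have hB : pairScanB (PySem.Dict.counter codes) e0 L = scanCnt e0 (fun v => mc.count v) L :=
        scanB_eq_scanCnt (PySem.Dict.counter codes) e0 (fun v => mc.count v) L (fun v _ => hgetD v)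
      rw [hB]
      exact scanA_eq_scanCnt e0 mc.length mc L (le_refl _)
        (PySem.List.sorted_pairwise codes (fun x => x)) hLsort hLmem
    · cases hqv : quadScanB (PySem.Dict.counter codes) L with
      | nil => exact absurd hqv hq
      | cons x xs =>
        simp
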